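-- pv_equiv track=rewrite | github.com/Tjnuzza/Python-stuff | Individual-scripts/DnDAbilityScoreRollTest.py | ScoreProcess
-- ===== SOURCE A (Python) =====
-- def ScoreProcess(arr):#Drop lowest die, add the rest, return the sum
--     LowRoll = 0
--     for i in range(4):
--         if arr[i] < arr[LowRoll]:
--             LowRoll = i
--     RollTotal = 0
--     for i in range(4):
--         RollTotal += arr[i]
--     AbScr = RollTotal-arr[LowRoll]
--     return AbScr
-- ===== SOURCE B (Python) =====
-- def ScoreProcess(arr):
--     vals = [arr[0], arr[1], arr[2], arr[3]]
--     return sum(sorted(vals)[1:])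
-- ===== Notes on version B (the rewrite author's own statement) =====
-- stated objective: idiomatic
-- what changed: Replaces the min-index scan plus full-sum-minus-min with the idiomatic sort-then-sum-the-top-three: sum(sorted(vals)[1:]) over the four explicitly indexed dice.
import Mathlib
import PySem

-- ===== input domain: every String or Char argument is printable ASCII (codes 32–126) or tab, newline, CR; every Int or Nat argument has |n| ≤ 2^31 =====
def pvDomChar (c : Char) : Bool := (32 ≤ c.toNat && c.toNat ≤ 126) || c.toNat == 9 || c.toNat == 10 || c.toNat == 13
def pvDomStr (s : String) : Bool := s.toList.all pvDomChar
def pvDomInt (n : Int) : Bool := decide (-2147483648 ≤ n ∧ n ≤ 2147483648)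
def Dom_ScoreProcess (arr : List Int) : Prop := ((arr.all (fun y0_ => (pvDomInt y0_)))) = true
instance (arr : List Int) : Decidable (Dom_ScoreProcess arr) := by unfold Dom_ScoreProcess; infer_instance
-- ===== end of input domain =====

-- B replaces A's min-index scan plus sum-minus-lowest with the idiomatic sort-then-sum-top-three (objective: idiomatic).

-- ===== PORT A =====
def ScoreProcess (arr : List Int) : Int :=
  let LowRoll : Int := (PySem.List.pyRange 0 4 1).foldl
    (fun lr i => if PySem.List.pyGetD arr i 0 < PySem.List.pyGetD arr lr 0 then i else lr) 0
  let RollTotal : Int := (PySem.List.pyRange 0 4 1).foldl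
    (fun s i => s + PySem.List.pyGetD arr i 0) 0
  RollTotal - PySem.List.pyGetD arr LowRoll 0

-- ===== PORT B =====
def ScoreProcess_alt (arr : List Int) : Int :=
  let vals : List Int :=
    [PySem.List.pyGetD arr 0 0, PySem.List.pyGetD arr 1 0,
     PySem.List.pyGetD arr 2 0, PySem.List.pyGetD arr 3 0]
  (PySem.List.slice (PySem.List.sorted vals (fun x => x) false) (some 1) none).foldl (· + ·) 0

-- ===== PRECONDITION & SPEC =====
-- Both programs index arr[0]..arr[3] and raise IndexError on lists shorter than 4; Pre_ excludes exactly those.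
def Pre_ScoreProcess (arr : List Int) : Prop := 4 ≤ arr.length
instance (arr : List Int) : Decidable (Pre_ScoreProcess arr) := by unfold Pre_ScoreProcess; infer_instance
def pvWitness_ScoreProcess : List Int := [3, 1, 4, 1]

def Spec_ScoreProcess (arr : List Int) (out : Int) : Prop := out = ScoreProcess_alt arr
instance (arr : List Int) (out : Int) : Decidable (Spec_ScoreProcess arr out) := by unfold Spec_ScoreProcess; infer_instance

-- ===== CLAIM =====
def Claim_equal_ScoreProcess : Prop := ∀ (arr : List Int), Dom_ScoreProcess arr → Pre_ScoreProcess arr → Spec_ScoreProcess arr (ScoreProcess arr)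

-- ===== LEMMAS AND PROOFS =====
set_option maxHeartbeats 1000000 in
theorem ScoreProcess_core (a b c d : Int) (t : List Int) :
    ScoreProcess (a :: b :: c :: d :: t) = ScoreProcess_alt (a :: b :: c :: d :: t) := by
  have hr : PySem.List.pyRange 0 4 1 = [0, 1, 2, 3] := by decide
  simp only [ScoreProcess, ScoreProcess_alt, hr, List.foldl, PySem.List.slice_from_one,
    PySem.List.pyGetD_ofNat', List.getD_cons_zero, List.getD_cons_succ,
    PySem.List.sorted, PySem.List.insertBy]
  split_ifs <;> simp_all [PySem.List.pyGetD_ofNat']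
  all_goals simp only [PySem.List.insertBy]
  all_goals (split_ifs <;> simp_all [PySem.List.insertBy] <;> (try split_ifs <;> simp_all) <;> omega)

-- ===== VERDICT =====
theorem ScoreProcess_spec : Claim_equal_ScoreProcess := by
  intro arr _ hpre
  unfold Pre_ScoreProcess at hpre
  match arr, hpre with
  | a :: b :: c :: d :: t, _ => exact ScoreProcess_core a b c d t
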